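-- pv_equiv track=rewrite | github.com/tiviluson/Orthogonal-Convex-Hull | convexOQH.py | find_o_hull1
-- ===== SOURCE A (Python) =====
-- def inside(p, p1, p2):
--     if p == p1 or p == p2:
--         return False
--     return min(p1[0], p2[0]) <= p[0] <= max(p1[0], p2[0]) and \
--            min(p1[1], p2[1]) <= p[1] <= max(p1[1], p2[1])
--
-- def find_o_hull1(set1, q1, qq1):
--     if len(set1) == 0:
--         #po = ortho(pf, pt, xInc, yInc) # SUPPORT POINTS
--         return []
--
--
--     '''
--         Sắp xếp tập set1 theo thứ tự giảm dần của tung độ, nếu có hai điểm có tung độ trùng nhau thì xếp theo thứ tự tăng dần của x (điểm có tung độ cao nhất với hành độ nhỏ nhất nằm ở đầu dãy)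
--     '''
--     sort_set1y = sorted(set1, key=lambda p: (-p[1], p[0]))
--     new_point11 = sort_set1y[0]
--     '''
--         Sắp xếp tập set1 theo thứ tự tăng dần của hoành, nếu có hai điểm có hoành độ trùng nhau thì xếp theo thứ tự giảm dần của y (điểm có hoảnh độ nhỏ nhất với tung độ lớn nhất nằm ở đầu dãy)
--     '''
--     sort_set1x = sorted(set1, key=lambda p: (p[0], -p[1]))
--     new_point12 = sort_set1x[0]
--     '''
--         The set of points on the right of L(new_point11, new_point12)
--     '''
--     new_set1 = [p for p in set1 if inside(p, new_point11, new_point12)]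
--     '''
--         Return two new points in order
--     '''
--     return [new_point11] + find_o_hull1(new_set1, new_point11, new_point12) + [new_point12]
-- ===== SOURCE B (Python) =====
-- def inside(p, p1, p2):
--     if p == p1 or p == p2:
--         return False
--     return min(p1[0], p2[0]) <= p[0] <= max(p1[0], p2[0]) and \
--            min(p1[1], p2[1]) <= p[1] <= max(p1[1], p2[1])
--
-- def find_o_hull1(set1, q1, qq1):
--     # iterative: the recursion [p11] + rec + [p12] unrolled into two accumulators
--     left, right, s = [], [], set1
--     while len(s) > 0:
--         p11 = sorted(s, key=lambda p: (-p[1], p[0]))[0]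
--         p12 = sorted(s, key=lambda p: (p[0], -p[1]))[0]
--         left.append(p11)
--         right.append(p12)
--         s = [p for p in s if inside(p, p11, p12)]
--     return left + right[::-1]
-- ===== Notes on version B (the rewrite author's own statement) =====
-- stated objective: alternative
-- what changed: Replaced the linear recursion that builds the sandwich [p11] + rec + [p12] by an explicit while-loop maintaining two accumulator lists (left, right) and returning left + right[::-1].
import Mathlib
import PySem

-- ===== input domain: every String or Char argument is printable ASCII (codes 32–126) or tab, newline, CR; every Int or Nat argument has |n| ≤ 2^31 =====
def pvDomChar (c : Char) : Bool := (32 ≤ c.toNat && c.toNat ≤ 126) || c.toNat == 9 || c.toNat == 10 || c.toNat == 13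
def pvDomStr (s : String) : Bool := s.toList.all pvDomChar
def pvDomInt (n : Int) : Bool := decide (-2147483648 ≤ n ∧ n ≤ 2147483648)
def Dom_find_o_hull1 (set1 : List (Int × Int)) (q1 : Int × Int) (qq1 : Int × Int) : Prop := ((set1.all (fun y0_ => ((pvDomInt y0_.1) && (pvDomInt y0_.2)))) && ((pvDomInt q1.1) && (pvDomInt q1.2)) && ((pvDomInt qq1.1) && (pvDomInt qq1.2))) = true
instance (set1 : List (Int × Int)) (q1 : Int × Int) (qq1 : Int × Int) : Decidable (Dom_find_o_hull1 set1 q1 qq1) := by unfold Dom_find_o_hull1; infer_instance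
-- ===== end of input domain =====

-- B unrolls A's linear recursion into a loop with two accumulators; same value, same cost (objective: alternative decomposition).

-- ===== PORT A =====
-- helper `inside` from the Python module
def insideB (p p1 p2 : Int × Int) : Bool :=
  if p = p1 ∨ p = p2 then false
  else decide (min p1.1 p2.1 ≤ p.1 ∧ p.1 ≤ max p1.1 p2.1) &&
       decide (min p1.2 p2.2 ≤ p.2 ∧ p.2 ≤ max p1.2 p2.2)

-- the filtered list drops p11 (insideB p11 _ _ = false) while p11 ∈ set1, so it is strictly shorter
theorem pvFilterShrink (set1 : List (Int × Int)) (p11 p12 : Int × Int)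
    (h : p11 ∈ set1) :
    (set1.filter (fun p => insideB p p11 p12)).length < set1.length := by
  rw [List.length_filter_lt_length_iff_exists]
  exact ⟨p11, h, by simp [insideB]⟩

theorem pvSortedHeadMem (xs : List (Int × Int)) (k1 k2 : (Int × Int) → Int) (p : Int × Int)
    (t : List (Int × Int)) (h : PySem.List.sorted2 xs k1 k2 = p :: t) : p ∈ xs := by
  have := PySem.List.sorted2_perm (xs := xs) (k1 := k1) (k2 := k2) (rev := false)
  rw [h] at this
  exact this.mem_iff.mp (List.mem_cons_self ..)

def find_o_hull1 (set1 : List (Int × Int)) (q1 : Int × Int) (qq1 : Int × Int) : List (Int × Int) :=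
  if set1.length = 0 then []
  else
    match h1 : PySem.List.sorted2 set1 (fun p => -p.2) (fun p => p.1) with
    | [] => []   -- unreachable (sorted of a nonempty list is nonempty)
    | p11 :: _ =>
      match h2 : PySem.List.sorted2 set1 (fun p => p.1) (fun p => -p.2) with
      | [] => []   -- unreachable
      | p12 :: _ =>
        [p11] ++ find_o_hull1 (set1.filter (fun p => insideB p p11 p12)) p11 p12 ++ [p12]
termination_by set1.length
decreasing_by
  simp only [List.unattach_filter, List.unattach_attach]
  exact pvFilterShrink set1 p11 p12 (pvSortedHeadMem _ _ _ _ _ h1)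

-- ===== PORT B =====
def altLoop (s left right : List (Int × Int)) : List (Int × Int) :=
  if s.length = 0 then left ++ right.reverse
  else
    match h1 : PySem.List.sorted2 s (fun p => -p.2) (fun p => p.1) with
    | [] => left ++ right.reverse   -- unreachable
    | p11 :: _ =>
      match h2 : PySem.List.sorted2 s (fun p => p.1) (fun p => -p.2) with
      | [] => left ++ right.reverse   -- unreachable
      | p12 :: _ =>
        altLoop (s.filter (fun p => insideB p p11 p12)) (left ++ [p11]) (right ++ [p12])
termination_by s.length
decreasing_by
  simp only [List.unattach_filter, List.unattach_attach]
  exact pvFilterShrink s p11 p12 (pvSortedHeadMem _ _ _ _ _ h1)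

def find_o_hull1_alt (set1 : List (Int × Int)) (q1 : Int × Int) (qq1 : Int × Int) : List (Int × Int) :=
  altLoop set1 [] []

-- ===== PRECONDITION & SPEC =====
def Spec_find_o_hull1 (set1 : List (Int × Int)) (q1 : Int × Int) (qq1 : Int × Int) (out : List (Int × Int)) : Prop := out = find_o_hull1_alt set1 q1 qq1
instance (set1 : List (Int × Int)) (q1 : Int × Int) (qq1 : Int × Int) (out : List (Int × Int)) : Decidable (Spec_find_o_hull1 set1 q1 qq1 out) := by unfold Spec_find_o_hull1; infer_instance

-- ===== CLAIM (what is proved, stated in full; the proofs are below) =====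
def Claim_equal_find_o_hull1 : Prop := ∀ (set1 : List (Int × Int)) (q1 : Int × Int) (qq1 : Int × Int), Dom_find_o_hull1 set1 q1 qq1 → Spec_find_o_hull1 set1 q1 qq1 (find_o_hull1 set1 q1 qq1)

-- ===== LEMMAS AND PROOFS =====

-- A's result does not depend on q1/qq1 (the body never reads them)
theorem find_o_hull1_irrel (set1 : List (Int × Int)) (q1 qq1 q1' qq1' : Int × Int) :
    find_o_hull1 set1 q1 qq1 = find_o_hull1 set1 q1' qq1' := by
  rw [find_o_hull1, find_o_hull1]

-- the loop invariant: altLoop s l r = l ++ (A's sandwich on s) ++ r.reverse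
theorem altLoop_eq (q1 qq1 : Int × Int) (s left right : List (Int × Int)) :
    altLoop s left right = left ++ find_o_hull1 s q1 qq1 ++ right.reverse := by
  induction s, left, right using altLoop.induct with
  | case1 s l r h => rw [altLoop, find_o_hull1]; simp [h]
  | case2 s l r h h1 =>
      rw [altLoop, find_o_hull1, if_neg h, if_neg h]
      split <;> simp_all
  | case3 s l r h p11 t1 h1 h2 =>
      rw [altLoop, find_o_hull1, if_neg h, if_neg h]
      split
      · simp_all
      · split <;> simp_all
  | case4 s l r h p11 t1 h1 p12 t2 h2 ih =>
      simp only [List.unattach_filter, List.unattach_attach] at ih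
      rw [altLoop, find_o_hull1, if_neg h, if_neg h]
      split
      · simp_all
      · rename_i a t heq
        have e := h1.symm.trans heq
        injection e with e1 e2
        subst e1; subst e2
        split
        · simp_all
        · rename_i b u heq2
          have e2 := h2.symm.trans heq2
          injection e2 with f1 f2
          subst f1; subst f2
          rw [ih, find_o_hull1_irrel _ p11 p12 q1 qq1]
          simp

-- ===== VERDICT (by name: the statement is the Claim_ definition above) =====
theorem find_o_hull1_spec : Claim_equal_find_o_hull1 := by
  intro set1 q1 qq1 _
  unfold Spec_find_o_hull1 find_o_hull1_alt
  rw [altLoop_eq q1 qq1]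
  simp
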